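-- pv_equiv track=rewrite | github.com/TheMoonK1d/St.Marry-University_Computer_Science | run_erteb.py | checkByte
-- ===== SOURCE A (Python) =====
-- def checkByte(id_High, id_Low, iters):
--     cb = (id_High + id_Low) & 0xff
--     if cb == 0:
--         cb = 1
--     if iters == 0:
--         iters = 1
--
--     for _ in range(iters):
--         tmp = (cb << 1) & 0xff
--         tmp ^= cb
--         tmp = (tmp << 1) & 0xff
--         tmp ^= cb
--         tmp = (tmp << 2) & 0xff
--         tmp ^= cb
--         cb = (cb << 1) & 0xff
--         if tmp & 0x80:
--             cb |= 0x01
--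
--     return cb
-- ===== SOURCE B (Python) =====
-- def checkByte(id_High, id_Low, iters):
--     # The loop body is an 8-bit LFSR step: shift left, feed back parity of taps {7,5,4,3}.
--     # Its state sequence is periodic with period dividing 255, so reduce the count mod 255.
--     cb = (id_High + id_Low) & 0xff
--     if cb == 0:
--         cb = 1
--     n = 1 if iters == 0 else iters
--     r = n % 255 if n > 0 else 0
--     for _ in range(r):
--         fb = ((cb >> 7) ^ (cb >> 5) ^ (cb >> 4) ^ (cb >> 3)) & 1
--         cb = ((cb << 1) & 0xff) | fb
--     return cb
-- ===== Notes on version B (the rewrite author's own statement) =====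
-- stated objective: faster
-- what changed: B recognises the loop body as an 8-bit LFSR step (shift left, feed back the parity of taps 7,5,4,3), whose state sequence is periodic with period dividing 255, and so runs the step only (iters mod 255) times instead of iters times.
import Mathlib
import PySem

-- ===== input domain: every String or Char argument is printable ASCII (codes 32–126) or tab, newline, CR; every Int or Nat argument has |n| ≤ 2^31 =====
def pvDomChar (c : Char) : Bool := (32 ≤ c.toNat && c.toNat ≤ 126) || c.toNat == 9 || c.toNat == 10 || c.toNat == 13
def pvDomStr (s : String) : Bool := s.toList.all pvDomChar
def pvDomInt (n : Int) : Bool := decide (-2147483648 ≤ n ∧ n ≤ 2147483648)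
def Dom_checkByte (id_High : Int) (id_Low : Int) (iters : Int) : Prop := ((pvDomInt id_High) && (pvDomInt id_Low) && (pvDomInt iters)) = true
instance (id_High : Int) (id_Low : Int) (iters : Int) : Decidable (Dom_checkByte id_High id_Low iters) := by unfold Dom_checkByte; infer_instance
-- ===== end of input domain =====

-- B replaces A's O(iters) loop by an LFSR tap-parity step repeated only (iters mod 255) times,
-- using the (proved) fact that the 8-bit step has period 255; same return value, asymptotically faster.

-- ===== PORT A =====
-- loop body of A, one iteration
def checkByteStepA (cb : Int) : Int :=
  let tmp := PySem.Int.band (cb <<< (1 : Nat)) 0xff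
  let tmp := PySem.Int.bxor tmp cb
  let tmp := PySem.Int.band (tmp <<< (1 : Nat)) 0xff
  let tmp := PySem.Int.bxor tmp cb
  let tmp := PySem.Int.band (tmp <<< (2 : Nat)) 0xff
  let tmp := PySem.Int.bxor tmp cb
  let cb := PySem.Int.band (cb <<< (1 : Nat)) 0xff
  if PySem.Int.band tmp 0x80 ≠ 0 then PySem.Int.bor cb 0x01 else cb

def checkByte (id_High : Int) (id_Low : Int) (iters : Int) : Int :=
  let cb := PySem.Int.band (id_High + id_Low) 0xff
  let cb := if cb = 0 then 1 else cb
  let iters := if iters = 0 then 1 else iters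
  (PySem.List.pyRange 0 iters 1).foldl (fun cb _ => checkByteStepA cb) cb

-- ===== PORT B =====
-- loop body of B: shift left, feed back the parity of taps {7,5,4,3}
def checkByteStepB (cb : Int) : Int :=
  let fb := PySem.Int.band (PySem.Int.bxor (PySem.Int.bxor (cb >>> (7 : Nat)) (cb >>> (5 : Nat))) (PySem.Int.bxor (cb >>> (4 : Nat)) (cb >>> (3 : Nat)))) 1
  PySem.Int.bor (PySem.Int.band (cb <<< (1 : Nat)) 0xff) fb

def checkByte_alt (id_High : Int) (id_Low : Int) (iters : Int) : Int :=
  let cb := PySem.Int.band (id_High + id_Low) 0xff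
  let cb := if cb = 0 then 1 else cb
  let n := if iters = 0 then 1 else iters
  let r := if 0 < n then PySem.Int.mod n 255 else 0
  (List.range r.toNat).foldl (fun cb _ => checkByteStepB cb) cb

-- ===== PRECONDITION & SPEC =====
def Spec_checkByte (id_High : Int) (id_Low : Int) (iters : Int) (out : Int) : Prop := out = checkByte_alt id_High id_Low iters
instance (id_High : Int) (id_Low : Int) (iters : Int) (out : Int) : Decidable (Spec_checkByte id_High id_Low iters out) := by unfold Spec_checkByte; infer_instance

-- ===== CLAIM (what is proved, stated in full; the proofs are below) =====
def Claim_equal_checkByte : Prop := ∀ (id_High : Int) (id_Low : Int) (iters : Int), Dom_checkByte id_High id_Low iters → Spec_checkByte id_High id_Low iters (checkByte id_High id_Low iters)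

-- ===== LEMMAS AND PROOFS =====

-- the step as a function on Fin 256 (proof device)
def cbStepF (x : Fin 256) : Fin 256 :=
  ⟨((((x.val >>> 7) ^^^ (x.val >>> 5) ^^^ (x.val >>> 4) ^^^ (x.val >>> 3)) &&& 1) |||
      ((x.val <<< 1) % 256)) % 256, Nat.mod_lt _ (by norm_num)⟩

-- a fold whose body ignores the list element is an iterate
theorem foldl_const_iterate {α β : Type} (f : α → α) (l : List β) (init : α) :
    l.foldl (fun acc _ => f acc) init = f^[l.length] init := by
  induction l generalizing init with
  | nil => rfl
  | cons a t ih => simp [List.foldl_cons, ih, Function.iterate_succ_apply]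

set_option maxRecDepth 4000 in
theorem stepA_bridge : ∀ x : Fin 256, checkByteStepA (x.val : Int) = ((cbStepF x).val : Int) := by decide
set_option maxRecDepth 4000 in
theorem stepB_bridge : ∀ x : Fin 256, checkByteStepB (x.val : Int) = ((cbStepF x).val : Int) := by decide

theorem iterA_bridge (n : Nat) (x : Fin 256) :
    checkByteStepA^[n] (x.val : Int) = ((cbStepF^[n] x).val : Int) := by
  induction n generalizing x with
  | zero => rfl
  | succ k ih => rw [Function.iterate_succ_apply, stepA_bridge, ih, Function.iterate_succ_apply]

theorem iterB_bridge (n : Nat) (x : Fin 256) :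
    checkByteStepB^[n] (x.val : Int) = ((cbStepF^[n] x).val : Int) := by
  induction n generalizing x with
  | zero => rfl
  | succ k ih => rw [Function.iterate_succ_apply, stepB_bridge, ih, Function.iterate_succ_apply]

set_option maxRecDepth 100000 in
set_option maxHeartbeats 2000000 in
theorem cbStepF_period : ∀ x : Fin 256, cbStepF^[255] x = x := by decide

theorem cbStepF_period_mul (q : Nat) (x : Fin 256) : cbStepF^[255 * q] x = x := by
  induction q with
  | zero => rfl
  | succ k ih => rw [Nat.mul_succ, Function.iterate_add_apply, cbStepF_period, ih]

theorem cbStepF_mod (n : Nat) (x : Fin 256) : cbStepF^[n] x = cbStepF^[n % 255] x := by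
  conv_lhs => rw [← Nat.div_add_mod n 255]
  rw [Function.iterate_add_apply, cbStepF_period_mul]

theorem band255_bounds (a : Int) :
    0 ≤ PySem.Int.band a 255 ∧ PySem.Int.band a 255 < 256 := by
  unfold PySem.Int.band
  split_ifs with h1 h2 h3
  · have h := Nat.and_le_right (n := a.toNat) (m := (255 : Int).toNat)
    constructor
    · positivity
    · norm_num at h ⊢; omega
  · norm_num at h2
  · have h := Nat.sub_le ((255 : Int).toNat) (((255 : Int).toNat) &&& (-a - 1).toNat)
    constructor
    · positivity
    · norm_num at h ⊢; omega
  · norm_num at h3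

theorem checkByte_key (cb n : Int) (h1 : 0 ≤ cb) (h2 : cb < 256) :
    (PySem.List.pyRange 0 n 1).foldl (fun c _ => checkByteStepA c) cb
    = (List.range (if 0 < n then PySem.Int.mod n 255 else 0).toNat).foldl
        (fun c _ => checkByteStepB c) cb := by
  have hxv : (((⟨cb.toNat, by omega⟩ : Fin 256) : Nat) : Int) = cb := by simp; omega
  have hr : (if 0 < n then PySem.Int.mod n 255 else 0).toNat = (n - 0).toNat % 255 := by
    by_cases h : 0 < n
    · rw [if_pos h, PySem.Int.mod_eq_emod_of_pos (by norm_num : (0:Int) < 255)]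
      omega
    · rw [if_neg h]; omega
  rw [foldl_const_iterate, foldl_const_iterate, PySem.List.length_pyRange_one,
      List.length_range, ← hxv, iterA_bridge, hr, iterB_bridge, cbStepF_mod]

-- ===== VERDICT (by name: the statement is the Claim_ definition above) =====
theorem checkByte_spec : Claim_equal_checkByte := by
  intro id_High id_Low iters _
  show checkByte id_High id_Low iters = checkByte_alt id_High id_Low iters
  have hb := band255_bounds (id_High + id_Low)
  exact checkByte_key
    (if PySem.Int.band (id_High + id_Low) 0xff = 0 then 1 else PySem.Int.band (id_High + id_Low) 0xff)
    (if iters = 0 then 1 else iters)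
    (by split_ifs <;> omega) (by split_ifs <;> omega)
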